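-- pv_equiv track=rewrite | github.com/Ekubbo/codewars | 5 kyu/first_variation_on_caesar_cipher.py | moving_shift
-- ===== SOURCE A (Python) =====
-- def shift_alpha(s, shift):
--     if s.isalpha():
--         base = ord("A") if s.isupper() else ord("a")
--         return chr((ord(s) - base + shift) % 26 + base)
--     else:
--         return s
--
-- def moving_shift(message, shift):
--     message = "".join([shift_alpha(s, i+shift) for i, s in enumerate(message)])
--     max_size = len(message) / float(5) + 1
--     max_size = int(max_size) if max_size % 1 != 0 else int(max_size) - 1
--     result = []
--     step = 0
--     for i in range(5):
--         result.append(message[step:step + min(max_size, len(message) - step)])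
--         step += min(max_size, len(message) - step)
--     return result
-- ===== SOURCE B (Python) =====
-- def moving_shift(message, shift):
--     # One pass: shift each character by its index-dependent amount and drop it
--     # straight into its bucket of size ceil(len/5); no intermediate full string.
--     max_size = (len(message) + 4) // 5
--     result = [''] * 5
--     for i, c in enumerate(message):
--         if c.isalpha():
--             base = ord('A') if c.isupper() else ord('a')
--             c = chr((ord(c) - base + i + shift) % 26 + base)
--         result[i // max_size] += c
--     return result
-- ===== Notes on version B (the rewrite author's own statement) =====
-- stated objective: simpler
-- what changed: B replaces A's build-whole-shifted-string-then-slice-with-a-float-derived-chunk-size-and-a-step-accumulator by a single pass that computes the chunk size as ceil(len/5) in integer arithmetic and distributes each shifted character directly into its bucket i // max_size.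
import Mathlib
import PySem

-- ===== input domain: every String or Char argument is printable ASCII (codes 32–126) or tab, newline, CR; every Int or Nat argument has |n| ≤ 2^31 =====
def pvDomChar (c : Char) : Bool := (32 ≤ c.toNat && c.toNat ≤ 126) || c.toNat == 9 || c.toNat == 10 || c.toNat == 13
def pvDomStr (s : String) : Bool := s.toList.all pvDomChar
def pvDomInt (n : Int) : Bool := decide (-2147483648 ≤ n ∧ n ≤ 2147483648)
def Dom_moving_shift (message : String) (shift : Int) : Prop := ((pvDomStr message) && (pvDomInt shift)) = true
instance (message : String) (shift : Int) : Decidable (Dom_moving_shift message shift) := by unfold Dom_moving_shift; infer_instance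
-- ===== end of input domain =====

-- B replaces A's build-whole-shifted-string-then-slice (float-derived chunk size,
-- step accumulator) by a single pass dropping each shifted character into bucket
-- i // max_size, with max_size = ceil(len/5) computed in integer arithmetic.

-- ===== PORT A =====
-- ord/chr are Char.toNat/Char.ofNat; '%' with the positive divisor 26 is PySem.Int.mod.
def shift_alpha (s : Char) (shift : Int) : Char :=
  if PySem.Chars.isalpha s then
    let base : Int := if PySem.Chars.isupper s then 65 else 97
    Char.ofNat (PySem.Int.mod ((s.toNat : Int) - base + shift) 26 + base).toNat
  else s

-- max_size = len/5.0 + 1: that float is non-integral exactly when len % 5 ≠ 0, and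
-- int() truncates it to len//5 + 1 (exact: for realizable lengths the float quotient
-- is never accidentally integral); ported in exact integer arithmetic. Strings are
-- handled as their character lists and joined by String.ofList at the end.
def moving_shift (message : String) (shift : Int) : List String :=
  let msg : List Char :=
    (PySem.List.enumerate message.toList 0).map (fun p => shift_alpha p.2 (p.1 + shift))
  let n : Int := (msg.length : Int)
  let max_size : Int :=
    if PySem.Int.mod n 5 ≠ 0 then PySem.Int.floordiv n 5 + 1
    else PySem.Int.floordiv n 5 + 1 - 1
  let r := (PySem.List.pyRange 0 5 1).foldl
    (fun (acc : List String × Int) _ =>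
      let t := min max_size (n - acc.2)
      (acc.1 ++ [String.ofList (PySem.List.slice msg (some acc.2) (some (acc.2 + t)))],
       acc.2 + t))
    (([] : List String), (0 : Int))
  r.1

-- ===== PORT B =====
-- Buckets are built as character lists (result[j] += c) and joined at the end;
-- the index i of enumerate is nonnegative, so i // max_size is Nat division.
def moving_shift_alt (message : String) (shift : Int) : List String :=
  let max_size : Nat := (message.toList.length + 4) / 5
  let buckets := (PySem.List.enumerate message.toList 0).foldl
    (fun (res : List (List Char)) p =>
      let c := p.2
      let c2 : Char :=
        if PySem.Chars.isalpha c then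
          let base : Int := if PySem.Chars.isupper c then 65 else 97
          Char.ofNat (PySem.Int.mod ((c.toNat : Int) - base + p.1 + shift) 26 + base).toNat
        else c
      let j : Nat := p.1.toNat / max_size
      res.set j (res.getD j [] ++ [c2]))
    ([[], [], [], [], []] : List (List Char))
  buckets.map String.ofList

-- ===== PRECONDITION & SPEC =====
def Spec_moving_shift (message : String) (shift : Int) (out : List String) : Prop := out = moving_shift_alt message shift
instance (message : String) (shift : Int) (out : List String) : Decidable (Spec_moving_shift message shift out) := by unfold Spec_moving_shift; infer_instance

-- ===== CLAIM (what is proved, stated in full; the proofs are below) =====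
def Claim_equal_moving_shift : Prop := ∀ (message : String) (shift : Int), Dom_moving_shift message shift → Spec_moving_shift message shift (moving_shift message shift)

-- ===== LEMMAS AND PROOFS =====

-- shifted characters of l at absolute positions s, s+1, …
def pvSh (sh : Int) (s : Nat) (l : List Char) : List Char :=
  (PySem.List.enumerate l (s : Int)).map (fun p => shift_alpha p.2 (p.1 + sh))

-- the segment xs[a:b] (Nat bounds, clamped)
def pvSeg (xs : List Char) (a b : Nat) : List Char := (xs.drop a).take (b - a)

lemma pvSh_nil (sh : Int) (s : Nat) : pvSh sh s [] = [] := by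
  simp [pvSh, PySem.List.enumerate_nil]

lemma pvSh_cons (sh : Int) (s : Nat) (c : Char) (l : List Char) :
    pvSh sh s (c :: l) = shift_alpha c ((s : Int) + sh) :: pvSh sh (s + 1) l := by
  simp [pvSh, PySem.List.enumerate_cons]

-- A's chunk step, as a named state transformer: one iteration of the slicing loop
def pvAstep (L : List Char) (n m : Nat) (acc : List String × Int) : List String × Int :=
  (acc.1 ++ [String.ofList (PySem.List.slice L (some acc.2)
      (some (acc.2 + min ((m : Nat) : Int) ((n : Int) - acc.2))))],
   acc.2 + min ((m : Nat) : Int) ((n : Int) - acc.2))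

-- at accumulated offset min (k*m) n, the step appends chunk k and advances to min ((k+1)*m) n
lemma pvA_step (L : List Char) (n m k : Nat) (hn : n = L.length) (acc : List String) :
    pvAstep L n m (acc, ((min (k * m) n : Nat) : Int))
    = (acc ++ [String.ofList (pvSeg L (k * m) (k * m + m))],
       ((min ((k + 1) * m) n : Nat) : Int)) := by
  subst hn
  unfold pvAstep
  dsimp only
  have hs0 : (0:Int) ≤ ((min (k * m) L.length : Nat) : Int) := by positivity
  have ht0 : (0:Int) ≤ min ((m:Nat):Int) (((L.length:Nat):Int) - ((min (k*m) L.length : Nat):Int)) := by omega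
  have hlist : PySem.List.slice L (some ((min (k * m) L.length : Nat) : Int))
      (some (((min (k * m) L.length : Nat) : Int) + min ((m:Nat):Int) (((L.length:Nat):Int) - ((min (k*m) L.length : Nat):Int))))
      = pvSeg L (k * m) (k * m + m) := by
    rw [PySem.List.slice_toNat L hs0 (by omega)]
    unfold pvSeg
    have hd : L.drop (((min (k * m) L.length : Nat) : Int)).toNat = L.drop (k*m) := by
      rcases Nat.lt_or_ge L.length (k*m) with h | h
      · rw [min_eq_right h.le]
        rw [List.drop_of_length_le h.le, Int.toNat_natCast, List.drop_length]
      · rw [min_eq_left h, Int.toNat_natCast]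
    rw [hd]
    apply List.take_eq_take_iff.mpr
    have hlen : (L.drop (k*m)).length = L.length - k*m := by simp
    rw [hlen]
    omega
  rw [hlist]
  refine Prod.ext rfl ?_
  simp only []
  rw [Nat.add_mul, Nat.one_mul]
  omega

-- B's bucket-filling fold, characterized: bucket j holds the shifted characters at
-- absolute positions in [j*m, (j+1)*m)
lemma pvB_inv (sh : Int) (m : Nat) (hm : 0 < m) (l : List Char) :
    ∀ (s : Nat) (res : List (List Char)), res.length = 5 → s + l.length ≤ 5 * m →
    (PySem.List.enumerate l (s : Int)).foldl
      (fun res p => res.set (p.1.toNat / m) (res.getD (p.1.toNat / m) [] ++ [shift_alpha p.2 (p.1 + sh)])) res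
    = List.ofFn (fun j : Fin 5 =>
        res.getD j [] ++ pvSeg (pvSh sh s l) ((j : Nat) * m - s) (((j : Nat) + 1) * m - s)) := by
  induction l with
  | nil =>
    intro s res hres _
    rw [PySem.List.enumerate_nil, List.foldl_nil]
    refine List.ext_getElem (by simp [hres]) ?_
    intro i h1 h2
    simp only [List.getElem_ofFn]
    rw [pvSh_nil]
    simp [pvSeg, List.getD, List.getElem?_eq_getElem h1]
  | cons c l ih =>
    intro s res hres hb
    rw [PySem.List.enumerate_cons, List.foldl_cons]
    have hcast : (s : Int) + 1 = ((s + 1 : Nat) : Int) := by push_cast; ring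
    rw [hcast]
    set j0 : Nat := s / m with hj0
    have hsm : s < 5 * m := by
      have := hb; simp only [List.length_cons] at this; omega
    have hj05 : j0 < 5 := (Nat.div_lt_iff_lt_mul hm).mpr (by omega)
    have hl0 : j0 * m ≤ s := Nat.div_mul_le_self s m
    have hu0 : s < j0 * m + m := by
      rw [hj0, Nat.mul_comm]
      have h1 := Nat.div_add_mod s m
      have h2 := Nat.mod_lt s hm
      omega
    set c2 := shift_alpha c ((s : Int) + sh) with hc2
    rw [ih (s+1) _ (by simp [hres]) (by simp only [List.length_cons] at hb; omega)]
    apply congrArg List.ofFn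
    funext j
    have hres' : (res.set j0 (res.getD j0 [] ++ [c2])).getD (j : Nat) [] =
          if (j : Nat) = j0 then res.getD j0 [] ++ [c2] else res.getD (j : Nat) [] := by
      simp only [List.getD, List.getElem?_set, hres]
      split_ifs with h1 h2 h3
      · simp [h1, hres]
      · omega
      · omega
      · rfl
    simp only [Int.toNat_natCast]
    rw [← hj0, hres', pvSh_cons, ← hc2]
    by_cases hj : (j : Nat) = j0
    · rw [if_pos hj, hj]
      have ha : j0 * m - s = 0 := by omega
      have ha' : j0 * m - (s + 1) = 0 := by omega
      have hb1 : (j0 + 1) * m - s = ((j0 + 1) * m - (s + 1)) + 1 := by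
        simp only [Nat.add_mul, Nat.one_mul]; omega
      unfold pvSeg
      rw [ha, ha', Nat.sub_zero, Nat.sub_zero, hb1, List.drop_zero, List.drop_zero,
        List.take_succ_cons, List.append_assoc, List.singleton_append]
    · rw [if_neg hj]
      apply congrArg
      rcases Nat.lt_or_ge (j : Nat) j0 with hlt | hge
      · -- j < j0 : this bucket is already complete, both segments empty
        have hje : ((j : Nat) + 1) * m ≤ s := le_trans (Nat.mul_le_mul_right m hlt) hl0
        unfold pvSeg
        have e1 : ((j : Nat) + 1) * m - s - ((j : Nat) * m - s) = 0 := by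
          have : (j : Nat) * m ≤ ((j : Nat) + 1) * m := by
            simp only [Nat.add_mul, Nat.one_mul]; omega
          omega
        have e2 : ((j : Nat) + 1) * m - (s + 1) - ((j : Nat) * m - (s + 1)) = 0 := by
          have : (j : Nat) * m ≤ ((j : Nat) + 1) * m := by
            simp only [Nat.add_mul, Nat.one_mul]; omega
          omega
        rw [e1, e2, List.take_zero, List.take_zero]
      · -- j > j0 : the head lands left of this segment
        have hjgt : j0 < (j : Nat) := lt_of_le_of_ne hge (fun h => hj h.symm)
        have hjs : s + 1 ≤ (j : Nat) * m := by
          have : (j0 + 1) * m ≤ (j : Nat) * m := Nat.mul_le_mul_right m hjgt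
          simp only [Nat.add_mul, Nat.one_mul] at this; omega
        have ha : (j : Nat) * m - s = ((j : Nat) * m - (s + 1)) + 1 := by omega
        unfold pvSeg
        rw [ha, List.drop_succ_cons]
        congr 1
        simp only [Nat.add_mul, Nat.one_mul]
        omega

-- ===== VERDICT (by name: the statement is the Claim_ definition above) =====
theorem moving_shift_spec : Claim_equal_moving_shift := by
  intro message shift _
  unfold Spec_moving_shift
  simp only [moving_shift, moving_shift_alt]
  generalize message.toList = l
  have hfun : (fun (res : List (List Char)) (p : Int × Char) =>
      res.set (p.1.toNat / ((l.length + 4) / 5))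
        (res.getD (p.1.toNat / ((l.length + 4) / 5)) [] ++
          [if PySem.Chars.isalpha p.2 then
              Char.ofNat (PySem.Int.mod ((p.2.toNat : Int) - (if PySem.Chars.isupper p.2 then (65:Int) else 97) + p.1 + shift) 26
                + (if PySem.Chars.isupper p.2 then (65:Int) else 97)).toNat
            else p.2]))
      = (fun res p => res.set (p.1.toNat / ((l.length + 4) / 5))
          (res.getD (p.1.toNat / ((l.length + 4) / 5)) [] ++ [shift_alpha p.2 (p.1 + shift)])) := by
    funext res p
    simp only [shift_alpha]
    split_ifs <;> simp [add_assoc]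
  rw [hfun]
  simp only [List.length_map, PySem.List.length_enumerate]
  set m : Nat := (l.length + 4) / 5 with hmdef
  by_cases hnil : l = []
  · subst hnil
    simp [PySem.List.enumerate_nil]
    decide
  · have hn0 : 0 < l.length := List.length_pos_iff.mpr hnil
    have hm : 0 < m := by rw [hmdef]; omega
    have hms : (if PySem.Int.mod ((l.length : Nat) : Int) 5 ≠ 0
        then PySem.Int.floordiv ((l.length : Nat) : Int) 5 + 1
        else PySem.Int.floordiv ((l.length : Nat) : Int) 5 + 1 - 1) = ((m : Nat) : Int) := by
      rw [PySem.Int.mod_eq_emod_of_pos (by norm_num : (0:Int) < 5), PySem.Int.floordiv_eq_ediv_of_pos (by norm_num : (0:Int) < 5), hmdef]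
      split_ifs with h <;> omega
    simp only [hms]
    set L := List.map (fun p : Int × Char => shift_alpha p.2 (p.1 + shift)) (PySem.List.enumerate l) with hL
    have hLlen : l.length = L.length := by simp [hL, PySem.List.length_enumerate]
    show (List.foldl (fun acc (_ : Int) => pvAstep L l.length m acc)
        ([], 0) (PySem.List.pyRange 0 5 1)).1 = _
    rw [show (([], (0 : Int)) : List String × Int) = (([], ((min (0 * m) l.length : Nat) : Int)) : List String × Int) by simp]
    have h5 : PySem.List.pyRange 0 5 1 = [0, 1, 2, 3, 4] := by decide
    rw [h5]
    simp only [List.foldl_cons, List.foldl_nil]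
    rw [pvA_step L l.length m 0 hLlen]
    rw [pvA_step L l.length m (0+1) hLlen]
    rw [pvA_step L l.length m (0+1+1) hLlen]
    rw [pvA_step L l.length m (0+1+1+1) hLlen]
    rw [pvA_step L l.length m (0+1+1+1+1) hLlen]
    rw [show PySem.List.enumerate l = PySem.List.enumerate l (((0 : Nat)) : Int) by norm_num]
    rw [pvB_inv shift m hm l 0 [[], [], [], [], []] rfl (by omega)]
    have hLsh : pvSh shift 0 l = L := by simp [pvSh, hL]
    rw [hLsh]
    simp only [List.ofFn_succ, List.ofFn_zero, List.map_cons, List.map_nil]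
    norm_num
    refine ⟨?_, ?_, ?_, ?_⟩ <;> (congr 2; ring)
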